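-- pv_equiv track=rewrite | github.com/frozenfas/aretomo-tilt-series-qc | aretomo3_preprocess/commands/run_aretomo3.py | _group_cmd
-- ===== SOURCE A (Python) =====
-- def _is_flag(token: str) -> bool:
--     """True if token is an AreTomo3 flag (e.g. -InPrefix), not a negative number."""
--     return len(token) >= 2 and token[0] == '-' and token[1].isalpha()
--
-- def _group_cmd(cmd: list) -> list:
--     """Group a flat command list into [[executable], [flag, val, ...], ...]."""
--     groups = [[cmd[0]]]
--     for token in cmd[1:]:
--         if _is_flag(token):
--             groups.append([token])
--         else:
--             groups[-1].append(token)
--     return groups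
-- ===== SOURCE B (Python) =====
-- def _is_flag(token: str) -> bool:
--     """True if token is an AreTomo3 flag (e.g. -InPrefix), not a negative number."""
--     return len(token) >= 2 and token[0] == '-' and token[1].isalpha()
--
-- def _group_cmd(cmd: list) -> list:
--     """Group a flat command list into [[executable], [flag, val, ...], ...]."""
--     flags = [i for i in range(1, len(cmd)) if _is_flag(cmd[i])]
--     return [cmd[b:e] for b, e in zip([0] + flags, flags + [len(cmd)])]
-- ===== Notes on version B (the rewrite author's own statement) =====
-- stated objective: alternative
-- what changed: B first collects the group-boundary indices (0 plus every flag position) in one scan, then builds the result by slicing cmd between consecutive boundaries, instead of A's fold that appends to or extends the last group in place.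
import Mathlib
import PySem

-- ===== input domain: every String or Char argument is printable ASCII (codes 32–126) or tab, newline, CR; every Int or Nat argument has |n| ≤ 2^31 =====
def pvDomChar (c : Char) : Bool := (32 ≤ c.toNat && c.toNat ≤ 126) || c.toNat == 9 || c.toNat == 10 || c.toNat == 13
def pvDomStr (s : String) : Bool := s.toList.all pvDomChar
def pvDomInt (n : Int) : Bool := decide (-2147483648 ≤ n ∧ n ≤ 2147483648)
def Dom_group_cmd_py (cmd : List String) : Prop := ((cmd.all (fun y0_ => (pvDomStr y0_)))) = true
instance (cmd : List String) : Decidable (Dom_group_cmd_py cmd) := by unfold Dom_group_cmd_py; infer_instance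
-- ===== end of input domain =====

-- B groups by collecting boundary indices and slicing between them, instead of A's fold
-- appending to / extending the last group (alternative decomposition, same cost).

-- ===== PORT A =====
-- _is_flag (shared helper of both Pythons)
def pvIsFlag (t : String) : Bool :=
  decide (2 ≤ PySem.Str.len t) && ((PySem.Str.pyGet? t 0).getD ' ' == '-')
    && PySem.Chars.isalpha ((PySem.Str.pyGet? t 1).getD ' ')

-- the body of A's for-loop over cmd[1:]
def pvStep (groups : List (List String)) (token : String) : List (List String) :=
  if pvIsFlag token then groups ++ [[token]]
  else groups.dropLast ++ [groups.getLastD [] ++ [token]]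

def group_cmd_py (cmd : List String) : List (List String) :=
  match PySem.List.pyGet? cmd 0 with
  | none => []   -- cmd[0]: IndexError on the empty list, excluded by Pre_
  | some c => (PySem.List.slice cmd (some 1) none).foldl pvStep [[c]]

-- ===== PORT B =====
-- flags = [i for i in range(1, len(cmd)) if _is_flag(cmd[i])]
def pvFlagIdx (cmd : List String) : List Int :=
  (PySem.List.pyRange 1 (cmd.length : Int) 1).filter
    (fun i => pvIsFlag ((PySem.List.pyGet? cmd i).getD ""))

def group_cmd_py_alt (cmd : List String) : List (List String) :=
  ((0 :: pvFlagIdx cmd).zip (pvFlagIdx cmd ++ [(cmd.length : Int)])).map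
    (fun p => PySem.List.slice cmd (some p.1) (some p.2))

-- ===== PRECONDITION & SPEC =====
-- Pre_ excludes only the empty list, on which A raises IndexError (cmd[0]).
def Pre_group_cmd_py (cmd : List String) : Prop := cmd ≠ []
instance (cmd : List String) : Decidable (Pre_group_cmd_py cmd) := by unfold Pre_group_cmd_py; infer_instance
def pvWitness_group_cmd_py : List String := ["AreTomo3", "-InPrefix", "x", "-5"]

def Spec_group_cmd_py (cmd : List String) (out : List (List String)) : Prop := out = group_cmd_py_alt cmd
instance (cmd : List String) (out : List (List String)) : Decidable (Spec_group_cmd_py cmd out) := by unfold Spec_group_cmd_py; infer_instance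

-- ===== CLAIM (what is proved, stated in full; the proofs are below) =====
def Claim_equal_group_cmd_py : Prop := ∀ (cmd : List String), Dom_group_cmd_py cmd → Pre_group_cmd_py cmd → Spec_group_cmd_py cmd (group_cmd_py cmd)

-- ===== LEMMAS AND PROOFS =====

-- A's recurrence: appending one token applies one step of the fold.
lemma pvA_concat (ys : List String) (t : String) (h : ys ≠ []) :
    group_cmd_py (ys ++ [t]) = pvStep (group_cmd_py ys) t := by
  obtain ⟨c, ys', rfl⟩ := List.exists_cons_of_ne_nil h
  show group_cmd_py (c :: (ys' ++ [t])) = _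
  simp [group_cmd_py, PySem.List.slice_from_one, List.foldl_append]

-- bounds of the indices B collects
lemma pvMem_flagIdx {cmd : List String} {i : Int} (h : i ∈ pvFlagIdx cmd) :
    1 ≤ i ∧ i < (cmd.length : Int) := by
  have := List.mem_filter.mp h
  exact (PySem.List.mem_pyRange_one.mp this.1)

-- how the boundary list grows when one token is appended
lemma pvFlagIdx_concat (ys : List String) (t : String) (h : ys ≠ []) :
    pvFlagIdx (ys ++ [t])
      = pvFlagIdx ys ++ (if pvIsFlag t then [(ys.length : Int)] else []) := by
  have hn : 1 ≤ (ys.length : Int) := by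
    have := List.length_pos_of_ne_nil h; omega
  unfold pvFlagIdx
  have hlen : (((ys ++ [t]).length : Nat) : Int) = (ys.length : Int) + 1 := by simp
  rw [hlen, PySem.List.pyRange_one_succ_right hn, List.filter_append]
  congr 1
  · apply List.filter_congr
    intro i hi
    have hb := PySem.List.mem_pyRange_one.mp hi
    have h0 : (0:Int) ≤ i := by omega
    have hlt : i.toNat < ys.length := by omega
    rw [PySem.List.pyGet?_of_nonneg _ h0, PySem.List.pyGet?_of_nonneg _ h0,
      List.getElem?_append_left hlt]
  · simp [List.filter]
    cases pvIsFlag t <;> rfl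

-- a slice not reaching the appended token is unchanged
lemma pvSlice_frozen (ys : List String) (t : String) {b e : Int}
    (hb : 0 ≤ b) (he0 : 0 ≤ e) (he : e ≤ (ys.length : Int)) :
    PySem.List.slice (ys ++ [t]) (some b) (some e)
      = PySem.List.slice ys (some b) (some e) := by
  rw [PySem.List.slice_toNat _ hb he0, PySem.List.slice_toNat _ hb he0]
  by_cases hble : b.toNat ≤ ys.length
  · rw [List.drop_append_of_le_length hble]
    exact List.take_append_of_le_length (by simp; omega)
  · have e1 : List.drop b.toNat ys = [] := List.drop_eq_nil_of_le (by omega)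
    have e2 : List.drop b.toNat (ys ++ [t]) = [] := List.drop_eq_nil_of_le (by simp; omega)
    rw [e1, e2]

-- the final slice absorbs the appended token
lemma pvSlice_last (ys : List String) (t : String) {b : Int}
    (hb : 0 ≤ b) (hble : b ≤ (ys.length : Int)) :
    PySem.List.slice (ys ++ [t]) (some b) (some ((ys.length : Int) + 1))
      = PySem.List.slice ys (some b) (some (ys.length : Int)) ++ [t] := by
  rw [PySem.List.slice_toNat _ hb (by omega), PySem.List.slice_toNat _ hb (by omega)]
  rw [List.drop_append_of_le_length (by omega)]
  rw [List.take_of_length_le (by simp; try omega), List.take_of_length_le (by simp; try omega)]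

-- the default of getLastD is irrelevant on a nonempty list
lemma pvGetLastD_irrel {α : Type} (l : List α) (c d : α) (h : l ≠ []) :
    l.getLast?.getD c = l.getLast?.getD d := by
  cases hl : l.getLast? with
  | none => exact absurd (List.getLast?_eq_none_iff.mp hl) h
  | some v => rfl

-- zipping (0::F) with (F ++ [x]) pairs consecutive boundaries
lemma pvZip_shift {α : Type} (a : α) (F : List α) (x : α) :
    (a :: F).zip (F ++ [x])
      = ((a :: F).dropLast.zip F) ++ [(F.getLastD a, x)] := by
  induction F generalizing a with
  | nil => simp
  | cons f F ih =>
      simp only [List.cons_append, List.zip_cons_cons, ih f]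
      simp [List.dropLast_cons_of_ne_nil]
      cases F with
      | nil => simp
      | cons g G =>
          rw [List.getLast?_cons_cons]
          exact pvGetLastD_irrel _ f a (by simp)

-- B's recurrence: appending one token acts like one step of A's fold.
lemma pvB_concat (ys : List String) (t : String) (h : ys ≠ []) :
    group_cmd_py_alt (ys ++ [t]) = pvStep (group_cmd_py_alt ys) t := by
  have hn1 : 1 ≤ (ys.length : Int) := by
    have := List.length_pos_of_ne_nil h; omega
  have hlen : (((ys ++ [t]).length : Nat) : Int) = (ys.length : Int) + 1 := by simp
  set F := pvFlagIdx ys with hF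
  have hmemF : ∀ i ∈ F, 1 ≤ i ∧ i < (ys.length : Int) := fun i hi => pvMem_flagIdx hi
  have hlast_bounds : 0 ≤ F.getLastD 0 ∧ F.getLastD 0 ≤ (ys.length : Int) := by
    have hmem0 : F.getLastD 0 ∈ (0 : Int) :: F := List.getLastD_mem_cons
    rcases List.mem_cons.mp hmem0 with h0 | hmem
    · rw [h0]; exact ⟨le_refl 0, by omega⟩
    · have := hmemF _ hmem; omega
  by_cases hf : pvIsFlag t
  · -- flag: a new group [t] is appended
    unfold group_cmd_py_alt
    rw [pvFlagIdx_concat ys t h, hlen]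
    simp only [← hF, hf, if_pos]
    rw [pvZip_shift 0 (F ++ [(ys.length : Int)]) ((ys.length : Int) + 1), List.map_append]
    have hd : ((0:Int) :: (F ++ [(ys.length : Int)])).dropLast = 0 :: F := by
      rw [show (0:Int) :: (F ++ [(ys.length : Int)]) = ((0:Int) :: F) ++ [(ys.length : Int)] from rfl]
      exact List.dropLast_concat
    rw [hd, List.getLastD_concat]
    simp only [pvStep]
    rw [if_pos hf]
    congr 1
    · apply List.map_congr_left
      intro p hp
      have h1 : p.1 ∈ (0 :: F) := (List.of_mem_zip hp).1
      have h2 : p.2 ∈ F ++ [(ys.length : Int)] := (List.of_mem_zip hp).2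
      have hb1 : 0 ≤ p.1 := by
        rcases List.mem_cons.mp h1 with h0 | hm
        · omega
        · have := hmemF _ hm; omega
      have hb2 : 0 ≤ p.2 ∧ p.2 ≤ (ys.length : Int) := by
        rcases List.mem_append.mp h2 with hm | hm
        · have := hmemF _ hm; omega
        · simp only [List.mem_singleton] at hm; omega
      exact pvSlice_frozen ys t hb1 hb2.1 hb2.2
    · simp only [List.map_cons, List.map_nil]
      congr 1
      rw [PySem.List.slice_toNat _ (by omega) (by omega)]
      rw [List.drop_append_of_le_length (by omega)]
      simp
  · -- not a flag: t joins the last group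
    unfold group_cmd_py_alt
    rw [pvFlagIdx_concat ys t h, hlen]
    simp only [← hF, hf, Bool.false_eq_true, if_false, List.append_nil]
    rw [pvZip_shift 0 F ((ys.length : Int) + 1), pvZip_shift 0 F (ys.length : Int),
      List.map_append, List.map_append]
    simp only [List.map_cons, List.map_nil]
    simp only [pvStep]
    rw [if_neg (by simp [hf]), List.dropLast_concat, List.getLastD_concat]
    congr 1
    · apply List.map_congr_left
      intro p hp
      have h1 : p.1 ∈ (0 :: F).dropLast := (List.of_mem_zip hp).1
      have h2 : p.2 ∈ F := (List.of_mem_zip hp).2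
      have hb1 : 0 ≤ p.1 := by
        rcases List.mem_cons.mp (List.dropLast_subset _ h1) with h0 | hm
        · omega
        · have := hmemF _ hm; omega
      have hb2 := hmemF _ h2
      exact pvSlice_frozen ys t hb1 (by omega) (by omega)
    · congr 1
      exact pvSlice_last ys t hlast_bounds.1 hlast_bounds.2

-- base case: a one-token command is one group
lemma pvBase (c : String) :
    group_cmd_py [c] = [[c]] ∧ group_cmd_py_alt [c] = [[c]] := by
  constructor <;> rfl

-- ===== VERDICT (by name: the statement is the Claim_ definition above) =====
theorem group_cmd_py_spec : Claim_equal_group_cmd_py := by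
  intro cmd hdom
  clear hdom
  unfold Spec_group_cmd_py
  induction cmd using List.reverseRecOn with
  | nil => intro hpre; exact absurd rfl hpre
  | append_singleton ys t ih =>
      intro _
      rcases eq_or_ne ys [] with rfl | hys
      · simp [(pvBase t).1, (pvBase t).2]
      · rw [pvA_concat ys t hys, pvB_concat ys t hys, ih hys]
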